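-- pv_equiv track=rewrite | github.com/P0rtOs/BIS | lab1.py | div2_dec
-- ===== SOURCE A (Python) =====
-- def _strip_leading_zeros(s: str) -> str:
--     s = s.lstrip('0')
--     return s if s else '0'
--
-- def _validate_dec_str(s: str) -> str:
--     if s is None:
--         raise ValueError("Порожнє значення")
--     s = str(s).strip()
--     if not s:
--         raise ValueError("Порожній рядок")
--     if any(ch < '0' or ch > '9' for ch in s):
--         raise ValueError(f"Невалідні символи {s!r}")
--     return _strip_leading_zeros(s)
--
-- def div2_dec(a: str) -> str:
--     a = _validate_dec_str(a)
--     if a == '0':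
--         return '0'
--     carry = 0
--     out = []
--     for ch in a:
--         cur = carry * 10 + (ord(ch) - 48)
--         out.append(chr((cur // 2) + 48))
--         carry = cur % 2
--     return _strip_leading_zeros(''.join(out))
-- ===== SOURCE B (Python) =====
-- def _strip_leading_zeros(s: str) -> str:
--     s = s.lstrip('0')
--     return s if s else '0'
--
-- def _validate_dec_str(s: str) -> str:
--     if s is None:
--         raise ValueError("Порожнє значення")
--     s = str(s).strip()
--     if not s:
--         raise ValueError("Порожній рядок")
--     if any(ch < '0' or ch > '9' for ch in s):
--         raise ValueError(f"Невалідні символи {s!r}")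
--     return _strip_leading_zeros(s)
--
-- def div2_dec(a: str) -> str:
--     a = _validate_dec_str(a)
--     n = 0
--     for ch in a:
--         n = n * 10 + (ord(ch) - 48)
--     return str(n // 2)
-- ===== Notes on version B (the rewrite author's own statement) =====
-- stated objective: simpler
-- what changed: B keeps the validation helpers but replaces the manual left-to-right long-division carry loop (building output digit characters and re-stripping zeros) with one accumulation of the whole value as a Python big integer followed by a single n // 2 and str().
import Mathlib
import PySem

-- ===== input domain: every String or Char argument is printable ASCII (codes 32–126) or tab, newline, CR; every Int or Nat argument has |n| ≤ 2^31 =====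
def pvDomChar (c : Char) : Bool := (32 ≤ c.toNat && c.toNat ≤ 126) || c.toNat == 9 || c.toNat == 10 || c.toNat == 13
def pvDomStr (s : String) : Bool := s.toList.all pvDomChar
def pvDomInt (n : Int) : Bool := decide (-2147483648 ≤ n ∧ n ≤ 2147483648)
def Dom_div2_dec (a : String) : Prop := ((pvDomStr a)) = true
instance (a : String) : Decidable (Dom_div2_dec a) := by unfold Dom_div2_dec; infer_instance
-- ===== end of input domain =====

-- B keeps A's validation/stripping behaviour but replaces the digit-by-digit long-division
-- carry loop with one accumulation of the whole integer value followed by a single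
-- division by two and str() (simpler decomposition; same return value).


-- ===== PORT A =====
-- _strip_leading_zeros: s.lstrip('0'), '0' if the result is empty
def pyStripLeadingZeros (l : List Char) : List Char :=
  let t := l.dropWhile (fun c => c = '0')
  if t = [] then ['0'] else t

-- _validate_dec_str: strip, raise ValueError (= none) on empty or non-digit, strip leading zeros
def pyValidateDec? (s : String) : Option (List Char) :=
  let t := (PySem.Str.strip s).toList
  if t = [] then none
  else if t.any (fun ch => ch < '0' || '9' < ch) then none
  else some (pyStripLeadingZeros t)

-- one iteration of A's carry loop: cur = carry*10 + (ord(ch)-48); append chr(cur//2+48); carry = cur%2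
def div2Step (st : Int × List Char) (ch : Char) : Int × List Char :=
  let cur : Int := st.1 * 10 + ((ch.toNat : Int) - 48)
  (PySem.Int.mod cur 2, st.2 ++ [Char.ofNat (PySem.Int.floordiv cur 2 + 48).toNat])

def div2_dec (a : String) : String :=
  match pyValidateDec? a with
  | none => ""   -- ValueError in Python; excluded by Pre_div2_dec
  | some d =>
    if d = ['0'] then "0"
    else
      let r := d.foldl div2Step (0, [])
      String.ofList (pyStripLeadingZeros r.2)

-- ===== PORT B =====
def div2_dec_alt (a : String) : String :=
  match pyValidateDec? a with
  | none => ""   -- ValueError in Python; excluded by Pre_div2_dec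
  | some d =>
    let n : Int := d.foldl (fun n ch => n * 10 + ((ch.toNat : Int) - 48)) 0
    PySem.Int.toStr (PySem.Int.floordiv n 2)

-- ===== PRECONDITION & SPEC =====
-- Pre_ excludes exactly the inputs on which A raises ValueError: strings that strip()
-- to empty and strings containing a non-digit character after stripping.
def Pre_div2_dec (a : String) : Prop :=
  (PySem.Str.strip a).toList ≠ [] ∧
    ((PySem.Str.strip a).toList.all fun c => 48 ≤ c.toNat && c.toNat ≤ 57) = true
instance (a : String) : Decidable (Pre_div2_dec a) := by unfold Pre_div2_dec; infer_instance

def pvWitness_div2_dec : String := " 0075 "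

def Spec_div2_dec (a : String) (out : String) : Prop := out = div2_dec_alt a
instance (a : String) (out : String) : Decidable (Spec_div2_dec a out) := by unfold Spec_div2_dec; infer_instance

-- ===== CLAIM (what is proved, stated in full; the proofs are below) =====
def Claim_equal_div2_dec : Prop := ∀ (a : String), Dom_div2_dec a → Pre_div2_dec a → Spec_div2_dec a (div2_dec a)

-- ===== LEMMAS AND PROOFS =====

def IsDigit (c : Char) : Prop := '0' ≤ c ∧ c ≤ '9'

def decVal (l : List Char) (acc : Nat) : Nat :=
  match l with
  | [] => acc
  | c :: cs => decVal cs (10 * acc + (c.toNat - 48))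

theorem decVal_nil (acc : Nat) : decVal [] acc = acc := rfl
theorem decVal_cons (acc : Nat) (c : Char) (cs : List Char) :
    decVal (c :: cs) acc = decVal cs (10 * acc + (c.toNat - 48)) := rfl

theorem decVal_acc (l : List Char) (acc : Nat) :
    decVal l acc = acc * 10 ^ l.length + decVal l 0 := by
  induction l generalizing acc with
  | nil => simp [decVal_nil]
  | cons c cs ih =>
    rw [decVal_cons, decVal_cons, ih, ih (10 * 0 + (c.toNat - 48))]
    simp only [List.length_cons]
    ring

theorem decVal_append_singleton (l : List Char) (c : Char) :
    decVal (l ++ [c]) 0 = 10 * decVal l 0 + (c.toNat - 48) := by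
  induction l with
  | nil => simp [decVal_nil, decVal_cons]
  | cons d ds ih =>
    simp only [List.cons_append, decVal_cons]
    rw [decVal_acc, ih, decVal_acc ds (10 * 0 + (d.toNat - 48))]
    simp only [List.length_append, List.length_cons, List.length_nil]
    ring

theorem decVal_zero_all_zero {l : List Char} (h : decVal l 0 = 0) :
    ∀ c ∈ l, 48 ≤ c.toNat → c = '0' := by
  induction l with
  | nil => intro c hc; exact absurd hc (List.not_mem_nil)
  | cons d ds ih =>
    rw [decVal_cons, decVal_acc] at h
    have hp : 0 < 10 ^ ds.length := by positivity
    have hd0 : d.toNat - 48 = 0 := by nlinarith [Nat.le_of_eq h]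
    have hds : decVal ds 0 = 0 := by omega
    intro c hc hd48
    rcases List.mem_cons.mp hc with rfl | hmem
    · have h48 : c.toNat = 48 := by omega
      apply Char.ext
      exact_mod_cast UInt32.toNat_inj.mp (by simpa using h48)
    · exact ih hds c hmem hd48

def natChars (n : Nat) : List Char :=
  if _h : n < 10 then [Nat.digitChar n]
  else natChars (n / 10) ++ [Nat.digitChar (n % 10)]
  decreasing_by exact Nat.div_lt_self (by omega) (by omega)

theorem digit_bounds {c : Char} (h : IsDigit c) : 48 ≤ c.toNat ∧ c.toNat ≤ 57 := by
  obtain ⟨h1, h2⟩ := h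
  exact ⟨h1, h2⟩

theorem digitChar_of_digit {c : Char} (h : IsDigit c) :
    Nat.digitChar (c.toNat - 48) = c := by
  obtain ⟨h1, h2⟩ := digit_bounds h
  have hinj : ∀ a b : Char, a.toNat = b.toNat → a = b := by
    intro a b hab
    exact Char.ext (by exact_mod_cast UInt32.toNat_inj.mp hab)
  apply hinj
  interval_cases hn : c.toNat <;> decide

theorem decVal_all_zero {l : List Char} (h : ∀ e ∈ l, e = '0') : decVal l 0 = 0 := by
  induction l with
  | nil => rfl
  | cons d ds ih =>
    have : d = '0' := h d (by simp)
    subst this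
    rw [decVal_cons]
    simpa using ih (fun e he => h e (by simp [he]))

theorem strip0_eq_natChars {l : List Char} (hne : l ≠ [])
    (hd : ∀ c ∈ l, IsDigit c) :
    pyStripLeadingZeros l = natChars (decVal l 0) := by
  induction l using List.reverseRecOn with
  | nil => exact absurd rfl hne
  | append_singleton ds c ih =>
    have hc : IsDigit c := hd c (by simp)
    have hds : ∀ e ∈ ds, IsDigit e := fun e he => hd e (by simp [he])
    have hq : c.toNat - 48 < 10 := by have := digit_bounds hc; omega
    rw [decVal_append_singleton]
    by_cases h0 : decVal ds 0 = 0
    · -- every char of ds is '0'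
      have hall : ∀ e ∈ ds, e = '0' := by
        intro e he
        exact decVal_zero_all_zero h0 e he (digit_bounds (hds e he)).1
      have hdrop : ds.dropWhile (fun c => c = '0') = [] := by
        rw [List.dropWhile_eq_nil_iff]
        intro e he; simp [hall e he]
      have : (ds ++ [c]).dropWhile (fun x => x = '0') = [c].dropWhile (fun x => x = '0') := by
        rw [List.dropWhile_append, hdrop]
        simp
      rw [h0]
      simp only [pyStripLeadingZeros, this]
      rw [natChars]
      simp only [Nat.mul_zero, Nat.zero_add, dif_pos hq]
      by_cases hc0 : c = '0'
      · subst hc0; simp [List.dropWhile]; decide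
      · have : [c].dropWhile (fun x => x = '0') = [c] := by
          simp [List.dropWhile, hc0]
        rw [this]
        simp [digitChar_of_digit hc]
    · -- ds has a nonzero digit
      have hdne : ds ≠ [] := by rintro rfl; exact h0 rfl
      have hdrop_ne : ds.dropWhile (fun c => c = '0') ≠ [] := by
        intro hnil
        exact h0 (decVal_all_zero (fun e he => by
          simpa using List.dropWhile_eq_nil_iff.mp hnil e he))
      have happ : (ds ++ [c]).dropWhile (fun x => x = '0') = ds.dropWhile (fun x => x = '0') ++ [c] := by
        rw [List.dropWhile_append, if_neg (by simpa using hdrop_ne)]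
      have hv : decVal ds 0 ≥ 1 := by omega
      have hbig : ¬ (10 * decVal ds 0 + (c.toNat - 48) < 10) := by omega
      rw [natChars, dif_neg hbig]
      have hdiv : (10 * decVal ds 0 + (c.toNat - 48)) / 10 = decVal ds 0 := by omega
      have hmod : (10 * decVal ds 0 + (c.toNat - 48)) % 10 = c.toNat - 48 := by omega
      rw [hdiv, hmod, digitChar_of_digit hc, ← ih hdne hds]
      simp only [pyStripLeadingZeros, happ]
      simp [hdrop_ne]

theorem natChars_lt {n : Nat} (h : n < 10) : natChars n = [Nat.digitChar n] := by
  rw [natChars]; simp [h]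

theorem natChars_ge {n : Nat} (h : ¬ n < 10) :
    natChars n = natChars (n / 10) ++ [Nat.digitChar (n % 10)] := by
  rw [natChars]; simp [h]

theorem toDigitsCore_eq_natChars (f n : Nat) (acc : List Char) (hf : n < f) :
    Nat.toDigitsCore 10 f n acc = natChars n ++ acc := by
  induction f generalizing n acc with
  | zero => omega
  | succ f ih =>
    rw [Nat.toDigitsCore]
    by_cases h : n / 10 = 0
    · have hn : n < 10 := by omega
      simp only [h]
      rw [natChars_lt hn, Nat.mod_eq_of_lt hn]
      simp
    · have h10 : 10 ≤ n := by omega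
      have hrec : n / 10 < f := by
        have h1 : n / 10 < n := Nat.div_lt_self (by omega) (by omega)
        omega
      simp only [if_neg h]
      rw [natChars_ge (n := n) (by omega), ih (n / 10) _ hrec]
      simp

theorem toDigits_eq_natChars (n : Nat) : Nat.toDigits 10 n = natChars n := by
  have := toDigitsCore_eq_natChars (n + 1) n [] (by omega)
  simpa [Nat.toDigits] using this

theorem toNat_ofNat_small {n : Nat} (h : n < 55296) : (Char.ofNat n).toNat = n := by
  rw [Char.toNat_ofNat, if_pos (Or.inl h)]

theorem isDigit_of_bounds {c : Char} (h1 : 48 ≤ c.toNat) (h2 : c.toNat ≤ 57) : IsDigit c := by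
  constructor
  · exact UInt32.le_iff_toNat_le.mpr h1
  · exact UInt32.le_iff_toNat_le.mpr h2

def halfRun (l : List Char) (c : Nat) : Nat × List Char :=
  match l with
  | [] => (c, [])
  | ch :: cs =>
    let cur := 10 * c + (ch.toNat - 48)
    let r := halfRun cs (cur % 2)
    (r.1, Char.ofNat (cur / 2 + 48) :: r.2)

theorem halfRun_nil (c : Nat) : halfRun [] c = (c, []) := rfl
theorem halfRun_cons (c : Nat) (ch : Char) (cs : List Char) :
    halfRun (ch :: cs) c =
      ((halfRun cs ((10 * c + (ch.toNat - 48)) % 2)).1,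
        Char.ofNat ((10 * c + (ch.toNat - 48)) / 2 + 48) ::
          (halfRun cs ((10 * c + (ch.toNat - 48)) % 2)).2) := rfl

theorem div2Step_digit (c : Nat) (out : List Char) (ch : Char) (hch : 48 ≤ ch.toNat) :
    div2Step ((c : Int), out) ch =
      ((((10 * c + (ch.toNat - 48)) % 2 : Nat) : Int),
        out ++ [Char.ofNat ((10 * c + (ch.toNat - 48)) / 2 + 48)]) := by
  show (PySem.Int.mod ((c : Int) * 10 + ((ch.toNat : Int) - 48)) 2,
        out ++ [Char.ofNat (PySem.Int.floordiv ((c : Int) * 10 + ((ch.toNat : Int) - 48)) 2 + 48).toNat]) = _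
  have hcur : (c : Int) * 10 + ((ch.toNat : Int) - 48) = ((10 * c + (ch.toNat - 48) : Nat) : Int) := by
    push_cast [Nat.cast_sub hch]
    ring
  rw [hcur]
  have hmod : PySem.Int.mod ((10 * c + (ch.toNat - 48) : Nat) : Int) 2 =
      (((10 * c + (ch.toNat - 48)) % 2 : Nat) : Int) := by
    exact_mod_cast PySem.Int.mod_natCast (10 * c + (ch.toNat - 48)) 2
  have hdiv : PySem.Int.floordiv ((10 * c + (ch.toNat - 48) : Nat) : Int) 2 =
      (((10 * c + (ch.toNat - 48)) / 2 : Nat) : Int) := by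
    exact_mod_cast PySem.Int.floordiv_natCast (10 * c + (ch.toNat - 48)) 2
  rw [hmod, hdiv]
  have : ((((10 * c + (ch.toNat - 48)) / 2 : Nat) : Int) + 48).toNat
      = (10 * c + (ch.toNat - 48)) / 2 + 48 := by omega
  rw [this]

theorem halfKey (cur L v2 r1 vcs : Nat) (h2 : 2 * v2 + r1 = cur % 2 * 10 ^ L + vcs) :
    2 * (cur / 2 * 10 ^ L + v2) + r1 = cur * 10 ^ L + vcs := by
  have e : cur = 2 * (cur / 2) + cur % 2 := by omega
  calc 2 * (cur / 2 * 10 ^ L + v2) + r1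
      = 2 * (cur / 2) * 10 ^ L + (2 * v2 + r1) := by ring
    _ = 2 * (cur / 2) * 10 ^ L + (cur % 2 * 10 ^ L + vcs) := by rw [h2]
    _ = (2 * (cur / 2) + cur % 2) * 10 ^ L + vcs := by ring
    _ = cur * 10 ^ L + vcs := by rw [← e]

theorem foldl_div2Step_eq_halfRun (l : List Char) (c : Nat) (out : List Char)
    (hd : ∀ e ∈ l, IsDigit e) :
    l.foldl div2Step ((c : Int), out) = (((halfRun l c).1 : Int), out ++ (halfRun l c).2) := by
  induction l generalizing c out with
  | nil => simp [halfRun_nil]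
  | cons ch cs ih =>
    have hch : 48 ≤ ch.toNat := (digit_bounds (hd ch (by simp))).1
    rw [List.foldl_cons, div2Step_digit c out ch hch,
        ih _ _ (fun e he => hd e (by simp [he])), halfRun_cons]
    simp

theorem halfRun_spec (l : List Char) (c : Nat) (hc : c < 2) (hd : ∀ e ∈ l, IsDigit e) :
    (halfRun l c).1 < 2 ∧
    2 * decVal (halfRun l c).2 0 + (halfRun l c).1 = decVal l c ∧
    (halfRun l c).2.length = l.length ∧
    (∀ e ∈ (halfRun l c).2, IsDigit e) := by
  induction l generalizing c with
  | nil => simp [halfRun_nil, decVal_nil, hc]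
  | cons ch cs ih =>
    have hchd := digit_bounds (hd ch (by simp))
    obtain ⟨ih1, ih2, ih3, ih4⟩ :=
      ih ((10 * c + (ch.toNat - 48)) % 2) (Nat.mod_lt _ (by omega)) (fun e he => hd e (by simp [he]))
    rw [halfRun_cons]
    have hchar : (Char.ofNat ((10 * c + (ch.toNat - 48)) / 2 + 48)).toNat
        = (10 * c + (ch.toNat - 48)) / 2 + 48 := toNat_ofNat_small (by omega)
    refine ⟨ih1, ?_, by simpa using ih3, ?_⟩
    · rw [decVal_cons, decVal_cons, hchar]
      have hacc1 : 10 * 0 + ((10 * c + (ch.toNat - 48)) / 2 + 48 - 48)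
          = (10 * c + (ch.toNat - 48)) / 2 := by omega
      rw [hacc1,
        decVal_acc ((halfRun cs ((10 * c + (ch.toNat - 48)) % 2)).2) ((10 * c + (ch.toNat - 48)) / 2),
        ih3, decVal_acc cs (10 * c + (ch.toNat - 48))]
      have hih := ih2
      rw [decVal_acc cs ((10 * c + (ch.toNat - 48)) % 2)] at hih
      exact halfKey _ _ _ _ _ hih
    · intro e he
      rcases List.mem_cons.mp he with rfl | hmem
      · exact isDigit_of_bounds (by rw [hchar]; omega) (by rw [hchar]; omega)
      · exact ih4 e hmem

theorem digitChar_toNat {n : Nat} (h : n < 10) : (Nat.digitChar n).toNat = n + 48 := by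
  interval_cases n <;> decide

theorem decVal_natChars (n : Nat) : decVal (natChars n) 0 = n := by
  induction n using Nat.strong_induction_on with
  | _ n ih =>
    by_cases h : n < 10
    · rw [natChars_lt h, decVal_cons, decVal_nil, digitChar_toNat h]
      omega
    · rw [natChars_ge h, decVal_append_singleton,
        ih (n / 10) (Nat.div_lt_self (by omega) (by omega)),
        digitChar_toNat (Nat.mod_lt _ (by omega))]
      omega

theorem natChars_digits (n : Nat) : ∀ e ∈ natChars n, IsDigit e := by
  induction n using Nat.strong_induction_on with
  | _ n ih =>
    by_cases h : n < 10
    · rw [natChars_lt h]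
      intro e he
      simp only [List.mem_singleton] at he
      subst he
      exact isDigit_of_bounds (by rw [digitChar_toNat h]; omega) (by rw [digitChar_toNat h]; omega)
    · rw [natChars_ge h]
      intro e he
      rcases List.mem_append.mp he with hm | hm
      · exact ih (n / 10) (Nat.div_lt_self (by omega) (by omega)) e hm
      · simp only [List.mem_singleton] at hm
        subst hm
        have hlt : n % 10 < 10 := Nat.mod_lt _ (by omega)
        exact isDigit_of_bounds (by rw [digitChar_toNat hlt]; omega) (by rw [digitChar_toNat hlt]; omega)

theorem natChars_ne_nil (n : Nat) : natChars n ≠ [] := by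
  by_cases h : n < 10
  · rw [natChars_lt h]; simp
  · rw [natChars_ge h]; simp

theorem foldl_int_eq_decVal (l : List Char) (hd : ∀ e ∈ l, IsDigit e) (m : Nat) :
    l.foldl (fun n ch => n * 10 + ((ch.toNat : Int) - 48)) (m : Int) = ((decVal l m : Nat) : Int) := by
  induction l generalizing m with
  | nil => simp [decVal_nil]
  | cons ch cs ih =>
    have hch : 48 ≤ ch.toNat := (digit_bounds (hd ch (by simp))).1
    rw [List.foldl_cons]
    have : (m : Int) * 10 + ((ch.toNat : Int) - 48) = ((10 * m + (ch.toNat - 48) : Nat) : Int) := by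
      push_cast [Nat.cast_sub hch]
      ring
    rw [this, ih (fun e he => hd e (by simp [he])), decVal_cons]

theorem validate_of_pre {a : String}
    (h1 : (PySem.Str.strip a).toList ≠ [])
    (h2 : ∀ c ∈ (PySem.Str.strip a).toList, '0' ≤ c ∧ c ≤ '9') :
    pyValidateDec? a = some (pyStripLeadingZeros (PySem.Str.strip a).toList) := by
  unfold pyValidateDec?
  have hany : ((PySem.Str.strip a).toList.any fun ch => decide (ch < '0') || decide ('9' < ch)) = false := by
    rw [List.any_eq_false]
    intro ch hch
    have := h2 ch hch
    simp only [Bool.or_eq_true, decide_eq_true_eq, not_or]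
    constructor
    · exact fun hlt => absurd this.1 (not_le.mpr hlt)
    · exact fun hlt => absurd this.2 (not_le.mpr hlt)
  rw [if_neg h1, hany]
  rfl

theorem main_equiv (a : String)
    (h1 : (PySem.Str.strip a).toList ≠ [])
    (h2 : ∀ c ∈ (PySem.Str.strip a).toList, '0' ≤ c ∧ c ≤ '9') :
    div2_dec a = div2_dec_alt a := by
  have hval := validate_of_pre h1 h2
  have hdig : ∀ c ∈ (PySem.Str.strip a).toList, IsDigit c := h2
  set t := (PySem.Str.strip a).toList with ht
  have hd_eq : pyStripLeadingZeros t = natChars (decVal t 0) := strip0_eq_natChars h1 hdig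
  set v := decVal t 0 with hv
  unfold div2_dec div2_dec_alt
  rw [hval]
  simp only [hd_eq]
  by_cases h0 : natChars v = ['0']
  · rw [h0]
    rw [if_pos rfl]
    decide
  · rw [if_neg h0]
    have hvne : v ≠ 0 := by
      intro hz
      apply h0
      rw [hz, natChars_lt (by omega)]
      decide
    have hdigs : ∀ e ∈ natChars v, IsDigit e := natChars_digits v
    have hvalue : decVal (natChars v) 0 = v := decVal_natChars v
    -- A side
    have hfold := foldl_div2Step_eq_halfRun (natChars v) 0 [] hdigs
    obtain ⟨hcar, hsum, hlen, hhd⟩ := halfRun_spec (natChars v) 0 (by omega) hdigs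
    rw [hvalue] at hsum
    have hhalf : decVal (halfRun (natChars v) 0).2 0 = v / 2 := by omega
    have hhdne : (halfRun (natChars v) 0).2 ≠ [] := by
      intro hz
      have := natChars_ne_nil v
      rw [hz] at hlen
      simp at hlen
      exact this (List.length_eq_zero_iff.mp hlen.symm)
    have hstrip : pyStripLeadingZeros (halfRun (natChars v) 0).2 = natChars (v / 2) := by
      rw [strip0_eq_natChars hhdne hhd, hhalf]
    -- B side
    have hbfold := foldl_int_eq_decVal (natChars v) hdigs 0
    rw [hvalue] at hbfold
    have hbdiv : PySem.Int.floordiv ((v : Nat) : Int) 2 = ((v / 2 : Nat) : Int) := by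
      exact_mod_cast PySem.Int.floordiv_natCast v 2
    simp only [Nat.cast_zero] at hfold hbfold
    rw [hfold, hbfold, hbdiv]
    simp only [List.nil_append, hstrip]
    unfold PySem.Int.toStr PySem.Int.toChars
    rw [if_neg (by omega)]
    have : ((v / 2 : Nat) : Int).toNat = v / 2 := by omega
    rw [this, toDigits_eq_natChars]

-- ===== VERDICT (by name: the statement is the Claim_ definition above) =====
theorem div2_dec_spec : Claim_equal_div2_dec := by
  intro a _hdom hpre
  obtain ⟨h1, hall⟩ := hpre
  have h2 : ∀ c ∈ (PySem.Str.strip a).toList, '0' ≤ c ∧ c ≤ '9' := by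
    intro c hc
    have hb := List.all_eq_true.mp hall c hc
    simp only [Bool.and_eq_true, decide_eq_true_eq] at hb
    exact isDigit_of_bounds hb.1 hb.2
  unfold Spec_div2_dec
  exact main_equiv a h1 h2
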